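-- pv_equiv track=rewrite | github.com/tau-/advent-of-code-2016 | src/adventofpython/day_01.py | find_distance_to_revisited_position
-- ===== SOURCE A (Python) =====
-- def find_distance_to_revisited_position(commands):
--     position = (0, 0)
--     direction = (0, 1)
--
--     visited = {}
--     revisited = None
--     visited[position] = True
--
--     for (turn, dist) in commands:
--         direction = change_direction(direction, turn)
--         for _ in range(dist):
--             position = (position[0] + direction[0], position[1] + direction[1])
--             if position in visited and revisited is None:
--                 return taxicab_distance(position)
--             else:
--                 visited[position] = True
--
--     return -1
--
-- def taxicab_distance(pos):
--     return sum(abs(x) for x in pos)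
--
-- def change_direction(dir, turn):
--     if turn == 'R':
--         return (dir[1], -dir[0])
--     elif turn == 'L':
--         return (-dir[1], dir[0])
-- ===== SOURCE B (Python) =====
-- def find_distance_to_revisited_position(commands):
--     # Phase 1: compute the whole path with closed-form segment arithmetic:
--     # heading is a rotation index into a delta table, each command's cells are
--     # generated by multiplication over a range, no per-step direction tuples.
--     DELTAS = [(0, 1), (1, 0), (0, -1), (-1, 0)]
--     heading = 0
--     x, y = 0, 0
--     path = [(0, 0)]
--     for turn, dist in commands:
--         heading = (heading + (1 if turn == 'R' else -1)) % 4
--         dx, dy = DELTAS[heading]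
--         steps = dist if dist > 0 else 0
--         path.extend((x + dx * k, y + dy * k) for k in range(1, steps + 1))
--         x, y = x + dx * steps, y + dy * steps
--     # Phase 2: scan the path for the first position seen before.
--     seen = set()
--     for pos in path:
--         if pos in seen:
--             return taxicab_distance(pos)
--         seen.add(pos)
--     return -1
--
-- def taxicab_distance(pos):
--     return sum(abs(x) for x in pos)
-- ===== Notes on version B (the rewrite author's own statement) =====
-- stated objective: alternative
-- what changed: Replaces A's interleaved unit-step walk with dict-based revisit check by a two-phase algorithm: phase 1 computes the whole path with a rotation-index heading into a delta table and closed-form segment generation (x+dx*k over a range), phase 2 scans the path once with a seen-set for the first repeat; change_direction and the per-step tuple stepping disappear.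
-- outside the precondition, e.g. on find_distance_to_revisited_position([('R', 1), ('R', 1), ('R', 1), ('R', 1), ('X', 1)]): A returns 0, B returns 0
import Mathlib
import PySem

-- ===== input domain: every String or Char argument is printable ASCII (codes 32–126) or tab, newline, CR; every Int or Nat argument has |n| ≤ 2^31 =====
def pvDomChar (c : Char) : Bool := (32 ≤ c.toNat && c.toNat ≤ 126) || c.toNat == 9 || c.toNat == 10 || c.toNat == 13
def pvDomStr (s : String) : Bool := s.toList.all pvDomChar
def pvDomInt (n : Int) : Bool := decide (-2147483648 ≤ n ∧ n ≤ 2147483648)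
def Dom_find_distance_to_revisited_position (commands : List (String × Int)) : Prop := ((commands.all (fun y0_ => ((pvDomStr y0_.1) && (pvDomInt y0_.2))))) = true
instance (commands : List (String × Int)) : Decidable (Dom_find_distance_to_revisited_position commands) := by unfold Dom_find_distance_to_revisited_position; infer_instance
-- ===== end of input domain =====

-- B replaces A's interleaved unit-step walk (with its dict revisit check and per-step direction
-- tuples) by a different algorithm: phase 1 computes the whole path via a rotation-index heading
-- into a delta table and closed-form segment generation (x + dx*k over a range), phase 2 scans the
-- path once with a seen-set for the first repeat (objective: alternative; same asymptotic cost).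

-- ===== PORT A =====
-- sum(abs(x) for x in pos) for a pair
def taxicab_distance (pos : Int × Int) : Int := |pos.1| + |pos.2|

-- change_direction; `dir` is Option because Python's variable can hold None after an invalid turn.
-- When dir is none and turn is 'R'/'L' Python raises TypeError (excluded by Pre_); we return none there.
def change_direction (dir : Option (Int × Int)) (turn : String) : Option (Int × Int) :=
  if turn = "R" then dir.map (fun d => (d.2, -d.1))
  else if turn = "L" then dir.map (fun d => (-d.2, d.1))
  else none

-- A's inner `for _ in range(dist)` loop: returns final position, visited dict, and the early return if any
def stepLoopA (n : Nat) (pos d : Int × Int) (visited : PySem.Dict (Int × Int) Bool) :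
    (Int × Int) × PySem.Dict (Int × Int) Bool × Option Int :=
  match n with
  | 0 => (pos, visited, none)
  | n + 1 =>
    let pos' := (pos.1 + d.1, pos.2 + d.2)
    if visited.contains pos' then (pos', visited, some (taxicab_distance pos'))
    else stepLoopA n pos' d (visited.insert pos' true)

-- A's outer loop over commands. When direction is none and dist > 0 Python raises TypeError
-- (excluded by Pre_); the port skips the steps there.
def cmdLoopA (cmds : List (String × Int)) (pos : Int × Int) (dir : Option (Int × Int))
    (visited : PySem.Dict (Int × Int) Bool) : Int :=
  match cmds with
  | [] => -1
  | (turn, dist) :: rest =>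
    match change_direction dir turn with
    | some d =>
      match stepLoopA dist.toNat pos d visited with
      | (_, _, some ans) => ans
      | (pos', visited', none) => cmdLoopA rest pos' (some d) visited'
    | none => cmdLoopA rest pos none visited

def find_distance_to_revisited_position (commands : List (String × Int)) : Int :=
  cmdLoopA commands (0, 0) (some (0, 1)) (PySem.Dict.insert PySem.Dict.empty (0, 0) true)

-- ===== PORT B =====
-- the DELTAS table
def pvDeltas : List (Int × Int) := [(0, 1), (1, 0), (0, -1), (-1, 0)]

-- DELTAS[h]; in B the index is always a `% 4` result, hence in range, so getD is exact
def pvDelta (h : Int) : Int × Int := (PySem.List.pyGet? pvDeltas h).getD (0, 0)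

-- the generator expression ((x + dx*k, y + dy*k) for k in range(1, steps+1))
def segCells (x y dx dy steps : Int) : List (Int × Int) :=
  (PySem.List.pyRange 1 (steps + 1) 1).map (fun k => (x + dx * k, y + dy * k))

-- phase 1: one pass over the commands, extending the path by whole segments
def walkB (cmds : List (String × Int)) (heading x y : Int) (path : List (Int × Int)) :
    List (Int × Int) :=
  match cmds with
  | [] => path
  | (turn, dist) :: rest =>
    let h' := PySem.Int.mod (heading + (if turn = "R" then 1 else -1)) 4
    let d := pvDelta h'
    let steps := if dist > 0 then dist else 0
    walkB rest h' (x + d.1 * steps) (y + d.2 * steps) (path ++ segCells x y d.1 d.2 steps)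

-- phase 2: scan the path for the first position seen before
def scanB (path : List (Int × Int)) (seen : PySem.Set (Int × Int)) : Int :=
  match path with
  | [] => -1
  | p :: rest => if PySem.Set.contains seen p then taxicab_distance p else scanB rest (PySem.Set.add seen p)

def find_distance_to_revisited_position_alt (commands : List (String × Int)) : Int :=
  scanB (walkB commands 0 0 0 [(0, 0)]) PySem.Set.empty

-- ===== PRECONDITION & SPEC =====
-- Pre_ excludes exactly the inputs whose command list is not an 'R'/'L' prefix followed by a tail of
-- invalid-turn commands with non-positive step counts: on those Python A raises TypeError at the first
-- invalid turn it must step through — unless a revisit happened earlier, in which case A returns that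
-- answer before reaching the invalid turn (a closed-form condition cannot see which happens first; on
-- those excluded returning inputs B returns the same value, see the cite).
def pvBadTail (l : List (String × Int)) : Bool :=
  l.all (fun p => !(p.1 == "R" || p.1 == "L") && p.2 ≤ 0)

def pvPreB (l : List (String × Int)) : Bool :=
  match l with
  | [] => true
  | p :: rest => if p.1 == "R" || p.1 == "L" then pvPreB rest else pvBadTail (p :: rest)

def Pre_find_distance_to_revisited_position (commands : List (String × Int)) : Prop :=
  pvPreB commands = true
instance (commands : List (String × Int)) : Decidable (Pre_find_distance_to_revisited_position commands) := by
  unfold Pre_find_distance_to_revisited_position; infer_instance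

def pvWitness_find_distance_to_revisited_position : (List (String × Int)) :=
  [("R", 2), ("L", 1), ("L", 3)]

def Spec_find_distance_to_revisited_position (commands : List (String × Int)) (out : Int) : Prop := out = find_distance_to_revisited_position_alt commands
instance (commands : List (String × Int)) (out : Int) : Decidable (Spec_find_distance_to_revisited_position commands out) := by unfold Spec_find_distance_to_revisited_position; infer_instance

-- ===== CLAIM (what is proved, stated in full; the proofs are below) =====
def Claim_equal_find_distance_to_revisited_position : Prop := ∀ (commands : List (String × Int)), Dom_find_distance_to_revisited_position commands → Pre_find_distance_to_revisited_position commands → Spec_find_distance_to_revisited_position commands (find_distance_to_revisited_position commands)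

-- ===== LEMMAS AND PROOFS =====

-- proof-side unit-step view of one of B's segments
def unitCells (n : Nat) (pos d : Int × Int) : List (Int × Int) :=
  match n with
  | 0 => []
  | n + 1 => (pos.1 + d.1, pos.2 + d.2) :: unitCells n (pos.1 + d.1, pos.2 + d.2) d

theorem unitCells_eq_map (n : Nat) : ∀ (pos d : Int × Int),
    unitCells n pos d =
      (List.range n).map (fun k : Nat =>
        (pos.1 + d.1 * (1 + (k : Int)), pos.2 + d.2 * (1 + (k : Int)))) := by
  induction n with
  | zero => intro pos d; simp [unitCells]
  | succ n ih =>
    intro pos d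
    simp only [unitCells]
    rw [List.range_succ_eq_map, List.map_cons, List.map_map, ih]
    congr 1
    · simp
    · apply List.map_congr_left
      intro k _
      simp only [Function.comp_apply, Prod.mk.injEq]
      constructor <;> push_cast <;> ring

-- B's segment, for a nonnegative step count, is the unit-step cell list
theorem segCells_eq_unit (x y dx dy : Int) (n : Nat) :
    segCells x y dx dy n = unitCells n (x, y) (dx, dy) := by
  rw [unitCells_eq_map, segCells, PySem.List.pyRange_one]
  have hn : ((n : Int) + 1 - 1).toNat = n := by omega
  rw [hn, List.map_map]
  apply List.map_congr_left
  intro k _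
  simp

theorem segCells_zero (x y dx dy : Int) : segCells x y dx dy 0 = [] := by
  simp [segCells, PySem.List.pyRange_one_eq_nil]

-- walkB accumulator lemma
theorem walkB_acc (cmds : List (String × Int)) : ∀ (h x y : Int) (path : List (Int × Int)),
    walkB cmds h x y path = path ++ walkB cmds h x y [] := by
  induction cmds with
  | nil => intro h x y path; simp [walkB]
  | cons c rest ih =>
    intro h x y path
    obtain ⟨turn, dist⟩ := c
    simp only [walkB]
    rw [ih _ _ _ (path ++ _), ih _ _ _ ([] ++ _)]
    simp

-- heading/direction correspondence: rotating in the table matches change_direction's formulas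
theorem delta_rotR (h : Int) (h0 : 0 ≤ h) (h4 : h < 4) :
    pvDelta (PySem.Int.mod (h + 1) 4) = ((pvDelta h).2, -(pvDelta h).1) := by
  interval_cases h <;> decide

theorem delta_rotL (h : Int) (h0 : 0 ≤ h) (h4 : h < 4) :
    pvDelta (PySem.Int.mod (h + -1) 4) = (-(pvDelta h).2, (pvDelta h).1) := by
  interval_cases h <;> decide

-- the inner loops agree: scanning a freshly generated segment (then a tail) from A's visited keys
-- either hits A's early return or continues the scan with A's updated visited keys
theorem step_agree (n : Nat) : ∀ (pos d : Int × Int) (visited : PySem.Dict (Int × Int) Bool)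
    (tail : List (Int × Int)),
    scanB (unitCells n pos d ++ tail) (PySem.Dict.keys visited) =
      (match stepLoopA n pos d visited with
       | (_, _, some ans) => ans
       | (_, visited', none) => scanB tail (PySem.Dict.keys visited')) ∧
    ((stepLoopA n pos d visited).2.2 = none →
      (stepLoopA n pos d visited).1 = (pos.1 + d.1 * n, pos.2 + d.2 * n)) := by
  induction n with
  | zero => intro pos d visited tail; simp [stepLoopA, unitCells]
  | succ n ih =>
    intro pos d visited tail
    simp only [stepLoopA, unitCells, List.cons_append]
    by_cases h : visited.contains (pos.1 + d.1, pos.2 + d.2)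
    · have hmem : (pos.1 + d.1, pos.2 + d.2) ∈ visited.keys :=
        (PySem.Dict.contains_iff_mem_keys visited _).mp h
      refine ⟨?_, by simp [h]⟩
      simp [h, scanB, hmem]
    · have hmem : (pos.1 + d.1, pos.2 + d.2) ∉ visited.keys := fun hm =>
        h ((PySem.Dict.contains_iff_mem_keys visited _).mpr hm)
      have hkeys : PySem.Dict.keys (visited.insert (pos.1 + d.1, pos.2 + d.2) true) =
          PySem.Dict.keys visited ++ [(pos.1 + d.1, pos.2 + d.2)] :=
        PySem.Dict.keys_insert_of_not_contains visited true (by simpa using h)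
      have hadd : PySem.Set.add (PySem.Dict.keys visited) (pos.1 + d.1, pos.2 + d.2) =
          PySem.Dict.keys visited ++ [(pos.1 + d.1, pos.2 + d.2)] := by
        simp [PySem.Set.add, PySem.Set.contains, hmem]
      constructor
      · simp only [if_neg h, scanB, PySem.Set.contains]
        rw [if_neg (by simpa using hmem), hadd, ← hkeys]
        exact (ih _ d (visited.insert _ true) tail).1
      · intro hnone
        simp only [if_neg h] at hnone ⊢
        have hfin := (ih (pos.1 + d.1, pos.2 + d.2) d (visited.insert _ true) tail).2 hnone
        rw [hfin]
        simp only [Prod.mk.injEq]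
        constructor <;> push_cast <;> ring

-- on a bad tail (no R/L, all dist ≤ 0) A reaches the end and returns -1 …
theorem cmdLoopA_badTail (cmds : List (String × Int)) : ∀ (pos : Int × Int)
    (dir : Option (Int × Int)) (visited : PySem.Dict (Int × Int) Bool),
    pvBadTail cmds = true → cmdLoopA cmds pos dir visited = -1 := by
  induction cmds with
  | nil => intro pos dir visited _; simp [cmdLoopA]
  | cons c rest ih =>
    intro pos dir visited hbad
    obtain ⟨turn, dist⟩ := c
    simp only [pvBadTail, List.all_cons, Bool.and_eq_true, Bool.not_eq_true'] at hbad
    obtain ⟨⟨hturn, _⟩, hrest⟩ := hbad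
    simp only [Bool.or_eq_false_iff, beq_eq_false_iff_ne, ne_eq] at hturn
    simp only [cmdLoopA, change_direction, if_neg hturn.1, if_neg hturn.2]
    exact ih pos none visited hrest

-- … and B adds no cells there
theorem walkB_badTail (cmds : List (String × Int)) : ∀ (h x y : Int),
    pvBadTail cmds = true → walkB cmds h x y [] = [] := by
  induction cmds with
  | nil => intro h x y _; simp [walkB]
  | cons c rest ih =>
    intro h x y hbad
    obtain ⟨turn, dist⟩ := c
    simp only [pvBadTail, List.all_cons, Bool.and_eq_true] at hbad
    obtain ⟨⟨_, hdist⟩, hrest⟩ := hbad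
    have hd : ¬ dist > 0 := by simp at hdist; omega
    simp only [walkB, if_neg hd, segCells_zero, List.nil_append]
    exact ih _ _ _ hrest

-- the main invariant: A's loop equals scanning B's remaining path from A's visited keys,
-- provided the heading index denotes A's current direction
theorem main_agree (cmds : List (String × Int)) : ∀ (h x y : Int)
    (visited : PySem.Dict (Int × Int) Bool),
    0 ≤ h → h < 4 → pvPreB cmds = true →
    cmdLoopA cmds (x, y) (some (pvDelta h)) visited =
      scanB (walkB cmds h x y []) (PySem.Dict.keys visited) := by
  induction cmds with
  | nil => intro h x y visited _ _ _; simp [cmdLoopA, walkB, scanB]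
  | cons c rest ih =>
    intro h x y visited h0 h4 hpre
    obtain ⟨turn, dist⟩ := c
    by_cases hRL : turn = "R" ∨ turn = "L"
    · have hpre' : pvPreB rest = true := by
        rcases hRL with h' | h' <;> simpa [pvPreB, h'] using hpre
      have hsteps : (if dist > 0 then dist else 0) = (dist.toNat : Int) := by
        split_ifs with hd <;> omega
      have hd' :
          change_direction (some (pvDelta h)) turn =
            some (pvDelta (PySem.Int.mod (h + (if turn = "R" then 1 else -1)) 4)) := by
        rcases hRL with h' | h' <;> subst h'
        · rw [if_pos rfl]
          simp only [change_direction, Option.map_some]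
          rw [delta_rotR h h0 h4]
          simp
        · rw [if_neg (by decide)]
          simp only [change_direction, if_neg (by decide : ¬ ("L" : String) = "R"),
            Option.map_some]
          rw [delta_rotL h h0 h4]
          simp
      simp only [cmdLoopA, walkB, hd', hsteps]
      rw [walkB_acc _ _ _ _ ([] ++ _), List.nil_append, segCells_eq_unit]
      set h' := PySem.Int.mod (h + (if turn = "R" then 1 else -1)) 4 with hh'
      have hb0 : 0 ≤ h' := PySem.Int.mod_nonneg _ (by norm_num)
      have hb4 : h' < 4 := PySem.Int.mod_lt _ (by norm_num)
      have hstep := step_agree dist.toNat (x, y) (pvDelta h') visited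
        (walkB rest h' (x + (pvDelta h').1 * dist.toNat) (y + (pvDelta h').2 * dist.toNat) [])
      rcases hA : stepLoopA dist.toNat (x, y) (pvDelta h') visited with ⟨posA, visA, ansA⟩
      rw [hA] at hstep
      cases ansA with
      | some ans => exact hstep.1.symm
      | none =>
        have hp : posA = (x + (pvDelta h').1 * dist.toNat, y + (pvDelta h').2 * dist.toNat) := by
          simpa using hstep.2 (by simp)
        rw [hstep.1, hp]
        exact ih h' _ _ visA hb0 hb4 hpre'
    · rw [not_or] at hRL
      have hbad : pvBadTail ((turn, dist) :: rest) = true := by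
        have h1 : (turn == "R" || turn == "L") = false := by
          simp [hRL.1, hRL.2]
        simpa [pvPreB, h1] using hpre
      rw [cmdLoopA_badTail _ _ _ _ hbad, walkB_badTail _ _ _ _ hbad]
      simp [scanB]

-- ===== VERDICT (by name: the statement is the Claim_ definition above) =====
theorem find_distance_to_revisited_position_spec : Claim_equal_find_distance_to_revisited_position := by
  intro commands _ hpre
  unfold Spec_find_distance_to_revisited_position
  unfold find_distance_to_revisited_position find_distance_to_revisited_position_alt
  rw [walkB_acc _ _ _ _ [(0, 0)]]
  have h0 : PySem.Dict.keys (PySem.Dict.insert PySem.Dict.empty ((0 : Int), (0 : Int)) true) = [((0 : Int), (0 : Int))] := by decide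
  have hδ : pvDelta 0 = ((0 : Int), (1 : Int)) := by decide
  rw [← hδ, main_agree commands 0 0 0 _ (by norm_num) (by norm_num) hpre, h0]
  simp [scanB, PySem.Set.contains, PySem.Set.add, PySem.Set.empty]
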